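-- pv_equiv track=rewrite | github.com/APeachyPurplePlatypus/Stardew_Valley_ESP | agents/game_state_agent.py | _is_item_in_season
-- ===== SOURCE A (Python) =====
-- SEASONAL_ITEMS: dict[str, set[str]] = {
--     "spring": {
--         "Parsnip", "Green Bean", "Cauliflower", "Potato",
--         "Wild Horseradish", "Daffodil", "Leek", "Dandelion",
--         "Catfish", "Shad", "Eel",
--         "Sunfish", "Blue Jazz", "Tulip",
--     },
--     "summer": {
--         "Tomato", "Hot Pepper", "Blueberry", "Melon",
--         "Spice Berry", "Grape", "Sweet Pea",
--         "Pufferfish", "Octopus", "Red Snapper", "Tilapia",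
--         "Sunflower", "Red Cabbage", "Poppy", "Summer Spangle",
--         "Fiddlehead Fern", "Starfruit",
--     },
--     "fall": {
--         "Corn", "Eggplant", "Pumpkin", "Yam",
--         "Common Mushroom", "Wild Plum", "Hazelnut", "Blackberry",
--         "Walleye", "Salmon", "Cranberries",
--         "Sunflower", "Fairy Rose", "Amaranth", "Artichoke",
--     },
--     "winter": {
--         "Winter Root", "Crystal Fruit", "Snow Yam", "Crocus",
--         "Nautilus Shell",
--     },
-- }
--
-- def _is_item_in_season(item_name: str, season: str) -> bool:
--     """Check if an item is obtainable in the given season.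
--
--     Items not in the SEASONAL_ITEMS dict are assumed to be available year-round.
--     Items listed for the given season return True.
--     Vault gold bundles (names like "2,500g") are always actionable.
--     """
--     # Vault gold bundles are always actionable
--     if item_name.replace(",", "").rstrip("g").isdigit():
--         return True
--     season_lower = season.lower()
--     # Check if this item appears in any seasonal set
--     is_seasonal = False
--     for s_name, items in SEASONAL_ITEMS.items():
--         if item_name in items:
--             is_seasonal = True
--             if s_name == season_lower:
--                 return True
--     # If the item is not in any seasonal set, it's available any season
--     return not is_seasonal
-- ===== SOURCE B (Python) =====
-- # Hand-maintained inverted index: item name -> seasons in which it is obtainable.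
-- # An item absent from this table is available year-round.
-- ITEM_SEASONS: dict[str, tuple[str, ...]] = {
--     "Amaranth": ('fall',),
--     "Artichoke": ('fall',),
--     "Blackberry": ('fall',),
--     "Blue Jazz": ('spring',),
--     "Blueberry": ('summer',),
--     "Catfish": ('spring',),
--     "Cauliflower": ('spring',),
--     "Common Mushroom": ('fall',),
--     "Corn": ('fall',),
--     "Cranberries": ('fall',),
--     "Crocus": ('winter',),
--     "Crystal Fruit": ('winter',),
--     "Daffodil": ('spring',),
--     "Dandelion": ('spring',),
--     "Eel": ('spring',),
--     "Eggplant": ('fall',),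
--     "Fairy Rose": ('fall',),
--     "Fiddlehead Fern": ('summer',),
--     "Grape": ('summer',),
--     "Green Bean": ('spring',),
--     "Hazelnut": ('fall',),
--     "Hot Pepper": ('summer',),
--     "Leek": ('spring',),
--     "Melon": ('summer',),
--     "Nautilus Shell": ('winter',),
--     "Octopus": ('summer',),
--     "Parsnip": ('spring',),
--     "Poppy": ('summer',),
--     "Potato": ('spring',),
--     "Pufferfish": ('summer',),
--     "Pumpkin": ('fall',),
--     "Red Cabbage": ('summer',),
--     "Red Snapper": ('summer',),
--     "Salmon": ('fall',),
--     "Shad": ('spring',),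
--     "Snow Yam": ('winter',),
--     "Spice Berry": ('summer',),
--     "Starfruit": ('summer',),
--     "Summer Spangle": ('summer',),
--     "Sunfish": ('spring',),
--     "Sunflower": ('summer', 'fall'),
--     "Sweet Pea": ('summer',),
--     "Tilapia": ('summer',),
--     "Tomato": ('summer',),
--     "Tulip": ('spring',),
--     "Walleye": ('fall',),
--     "Wild Horseradish": ('spring',),
--     "Wild Plum": ('fall',),
--     "Winter Root": ('winter',),
--     "Yam": ('fall',),
-- }
--
--
-- def _is_item_in_season(item_name: str, season: str) -> bool:
--     """Check if an item is obtainable in the given season (inverted-table version)."""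
--     # Vault gold bundles are always actionable
--     if item_name.replace(",", "").rstrip("g").isdigit():
--         return True
--     seasons = ITEM_SEASONS.get(item_name)
--     return seasons is None or season.lower() in seasons
-- ===== Notes on version B (the rewrite author's own statement) =====
-- stated objective: simpler
-- what changed: B replaces A's per-call loop over the nested season->items table (with its is_seasonal flag and early return) by a hand-written inverted index constant mapping each item to its seasons, so the function body is the gold-bundle guard plus one dictionary lookup and one membership test.
import Mathlib
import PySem

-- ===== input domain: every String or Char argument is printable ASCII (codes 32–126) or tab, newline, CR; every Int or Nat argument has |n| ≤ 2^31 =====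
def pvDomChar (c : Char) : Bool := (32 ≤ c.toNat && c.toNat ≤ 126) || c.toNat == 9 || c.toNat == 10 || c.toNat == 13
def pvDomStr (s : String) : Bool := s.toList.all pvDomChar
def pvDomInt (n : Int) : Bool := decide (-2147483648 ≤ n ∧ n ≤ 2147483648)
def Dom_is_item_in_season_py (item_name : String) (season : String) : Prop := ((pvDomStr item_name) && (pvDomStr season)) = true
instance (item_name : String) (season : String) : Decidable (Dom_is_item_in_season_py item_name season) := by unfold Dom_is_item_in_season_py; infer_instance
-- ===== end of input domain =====

-- B replaces A's per-call scan over the nested season->items table with a hand-written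
-- inverted index literal (item -> its seasons) and one dictionary lookup (objective: simpler).


-- ===== PORT A =====
-- SEASONAL_ITEMS: dict (insertion order) of season name -> set of item names
def pvSeasonalItems : List (String × List String) :=
  [("spring", ["Parsnip", "Green Bean", "Cauliflower", "Potato",
               "Wild Horseradish", "Daffodil", "Leek", "Dandelion",
               "Catfish", "Shad", "Eel", "Sunfish", "Blue Jazz", "Tulip"]),
   ("summer", ["Tomato", "Hot Pepper", "Blueberry", "Melon",
               "Spice Berry", "Grape", "Sweet Pea",
               "Pufferfish", "Octopus", "Red Snapper", "Tilapia",
               "Sunflower", "Red Cabbage", "Poppy", "Summer Spangle",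
               "Fiddlehead Fern", "Starfruit"]),
   ("fall",   ["Corn", "Eggplant", "Pumpkin", "Yam",
               "Common Mushroom", "Wild Plum", "Hazelnut", "Blackberry",
               "Walleye", "Salmon", "Cranberries",
               "Sunflower", "Fairy Rose", "Amaranth", "Artichoke"]),
   ("winter", ["Winter Root", "Crystal Fruit", "Snow Yam", "Crocus",
               "Nautilus Shell"])]

-- item_name.replace(",", "").rstrip("g").isdigit() — rstrip("g") (strip all trailing 'g')
-- is ported by hand as reverse/dropWhile/reverse, exact since the stripped set is one char.
def pvGoldGuard (item_name : String) : Bool :=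
  PySem.Chars.strIsdigit
    ((((PySem.Str.replace item_name "," "").toList.reverse.dropWhile (· == 'g')).reverse))

-- the for-loop of A, with the running is_seasonal flag and the early return
def pvALoop (item_name : String) (season_lower : String) :
    List (String × List String) → Bool → Bool
  | [], is_seasonal => !is_seasonal
  | (s_name, items) :: rest, is_seasonal =>
    if items.contains item_name then
      if s_name == season_lower then true
      else pvALoop item_name season_lower rest true
    else pvALoop item_name season_lower rest is_seasonal

def is_item_in_season_py (item_name : String) (season : String) : Bool :=
  if pvGoldGuard item_name then true
  else pvALoop item_name (PySem.Str.lower season) pvSeasonalItems false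

-- ===== PORT B =====
-- ITEM_SEASONS: hand-maintained inverted index literal, item name -> its seasons
def pvItemSeasons : PySem.Dict String (List String) :=
  PySem.Dict.mk [
   ("Amaranth", ["fall"]),
   ("Artichoke", ["fall"]),
   ("Blackberry", ["fall"]),
   ("Blue Jazz", ["spring"]),
   ("Blueberry", ["summer"]),
   ("Catfish", ["spring"]),
   ("Cauliflower", ["spring"]),
   ("Common Mushroom", ["fall"]),
   ("Corn", ["fall"]),
   ("Cranberries", ["fall"]),
   ("Crocus", ["winter"]),
   ("Crystal Fruit", ["winter"]),
   ("Daffodil", ["spring"]),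
   ("Dandelion", ["spring"]),
   ("Eel", ["spring"]),
   ("Eggplant", ["fall"]),
   ("Fairy Rose", ["fall"]),
   ("Fiddlehead Fern", ["summer"]),
   ("Grape", ["summer"]),
   ("Green Bean", ["spring"]),
   ("Hazelnut", ["fall"]),
   ("Hot Pepper", ["summer"]),
   ("Leek", ["spring"]),
   ("Melon", ["summer"]),
   ("Nautilus Shell", ["winter"]),
   ("Octopus", ["summer"]),
   ("Parsnip", ["spring"]),
   ("Poppy", ["summer"]),
   ("Potato", ["spring"]),
   ("Pufferfish", ["summer"]),
   ("Pumpkin", ["fall"]),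
   ("Red Cabbage", ["summer"]),
   ("Red Snapper", ["summer"]),
   ("Salmon", ["fall"]),
   ("Shad", ["spring"]),
   ("Snow Yam", ["winter"]),
   ("Spice Berry", ["summer"]),
   ("Starfruit", ["summer"]),
   ("Summer Spangle", ["summer"]),
   ("Sunfish", ["spring"]),
   ("Sunflower", ["summer", "fall"]),
   ("Sweet Pea", ["summer"]),
   ("Tilapia", ["summer"]),
   ("Tomato", ["summer"]),
   ("Tulip", ["spring"]),
   ("Walleye", ["fall"]),
   ("Wild Horseradish", ["spring"]),
   ("Wild Plum", ["fall"]),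
   ("Winter Root", ["winter"]),
   ("Yam", ["fall"])]

def is_item_in_season_py_alt (item_name : String) (season : String) : Bool :=
  if pvGoldGuard item_name then true
  else match pvItemSeasons.get? item_name with
    | none => true
    | some seasons => seasons.contains (PySem.Str.lower season)

-- ===== PRECONDITION & SPEC =====
def Spec_is_item_in_season_py (item_name : String) (season : String) (out : Bool) : Prop := out = is_item_in_season_py_alt item_name season
instance (item_name : String) (season : String) (out : Bool) : Decidable (Spec_is_item_in_season_py item_name season out) := by unfold Spec_is_item_in_season_py; infer_instance

-- ===== CLAIM (what is proved, stated in full; the proofs are below) =====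
def Claim_equal_is_item_in_season_py : Prop := ∀ (item_name : String) (season : String), Dom_is_item_in_season_py item_name season → Spec_is_item_in_season_py item_name season (is_item_in_season_py item_name season)

-- ===== LEMMAS AND PROOFS =====

-- characterisation of A's loop
theorem pv_aLoop_eq (L : List (String × List String)) (item sl : String) (b : Bool) :
    pvALoop item sl L b
      = (L.any (fun p => p.2.contains item && p.1 == sl)
          || (!b && !L.any (fun p => p.2.contains item))) := by
  induction L generalizing b with
  | nil => simp [pvALoop]
  | cons p rest ih =>
    obtain ⟨sname, items⟩ := p
    by_cases hmem : item ∈ items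
    · by_cases hs : sname = sl
      · simp [pvALoop, hmem, hs]
      · simp [pvALoop, hmem, hs, ih]
    · simp [pvALoop, hmem, ih]

-- every item of the nested table is a key of the inverted index (checked on the literals)
theorem pv_keys_complete :
    pvSeasonalItems.all (fun p => p.2.all (fun it => (pvItemSeasons.get? it).isSome)) = true := by
  decide

-- the inverted index is sound and complete w.r.t. the nested table (checked on the literals)
theorem pv_tbl_ok :
    pvItemSeasons.items.all (fun q =>
      (!q.2.isEmpty) &&
      q.2.all (fun s => pvSeasonalItems.any (fun p => p.1 == s && p.2.contains q.1)) &&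
      pvSeasonalItems.all (fun p => !p.2.contains q.1 || q.2.contains p.1)) = true := by
  decide

-- first-match lookup success implies membership of the pair
theorem pv_get?_mem {l : List (String × List String)} {x : String} {v : List String}
    (h : (PySem.Dict.mk l).get? x = some v) : (x, v) ∈ l := by
  induction l with
  | nil => simp [PySem.Dict.get?] at h
  | cons q rest ih =>
    obtain ⟨k, w⟩ := q
    rw [PySem.Dict.get?_mk_cons] at h
    by_cases hk : k = x
    · simp [hk] at h; subst hk h; exact List.mem_cons_self
    · have : (k == x) = false := by simp [hk]
      rw [this] at h; simp at h
      exact List.mem_cons_of_mem _ (ih h)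

-- first-match lookup failure implies the key is absent
theorem pv_get?_none {l : List (String × List String)} {x : String}
    (h : (PySem.Dict.mk l).get? x = none) : ∀ q ∈ l, q.1 ≠ x := by
  induction l with
  | nil => intro q hq; simp at hq
  | cons q rest ih =>
    obtain ⟨k, w⟩ := q
    rw [PySem.Dict.get?_mk_cons] at h
    by_cases hk : k = x
    · simp [hk] at h
    · have hb : (k == x) = false := by simp [hk]
      rw [hb] at h; simp at h
      intro r hr
      rcases List.mem_cons.mp hr with h1 | h2
      · subst h1; exact hk
      · exact ih h r h2

-- ===== VERDICT (by name: the statement is the Claim_ definition above) =====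
theorem is_item_in_season_py_spec : Claim_equal_is_item_in_season_py := by
  intro item season _
  show is_item_in_season_py item season = is_item_in_season_py_alt item season
  unfold is_item_in_season_py is_item_in_season_py_alt
  by_cases hg : pvGoldGuard item = true
  · rw [if_pos hg, if_pos hg]
  · rw [if_neg hg, if_neg hg, pv_aLoop_eq]
    set sl := PySem.Str.lower season with hsl
    cases h : pvItemSeasons.get? item with
    | none =>
      -- item is in no seasonal set
      have habs := pv_get?_none h
      have h2 : pvSeasonalItems.any (fun p => p.2.contains item) = false := by
        rw [List.any_eq_false]
        intro p hp
        simp only [Bool.not_eq_true, List.contains_eq_mem, decide_eq_false_iff_not]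
        intro hmem
        have := (List.all_eq_true.mp pv_keys_complete) p hp
        have := (List.all_eq_true.mp this) item hmem
        rw [h] at this; simp at this
      have h1 : pvSeasonalItems.any (fun p => p.2.contains item && p.1 == sl) = false := by
        rw [List.any_eq_false]
        intro p hp
        have := List.any_eq_false.mp h2 p hp
        simp_all
      rw [h1, h2]; simp
    | some seasons =>
      have hmemT : (item, seasons) ∈ pvItemSeasons.items := pv_get?_mem h
      have hok := (List.all_eq_true.mp pv_tbl_ok) _ hmemT
      simp only [Bool.and_eq_true] at hok
      obtain ⟨⟨hne, hsound⟩, hcompl⟩ := hok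
      -- item IS seasonal: some set contains it
      have hin : pvSeasonalItems.any (fun p => p.2.contains item) = true := by
        rcases seasons with _ | ⟨s0, rest⟩
        · simp at hne
        · have := (List.all_eq_true.mp hsound) s0 List.mem_cons_self
          rw [List.any_eq_true] at this ⊢
          obtain ⟨p, hp, hps⟩ := this
          simp only [Bool.and_eq_true] at hps
          exact ⟨p, hp, hps.2⟩
      rw [hin]
      simp only [Bool.not_true, Bool.and_false, Bool.or_false]
      -- remaining: any (contains && == sl) = seasons.contains sl
      rcases hc : (seasons.contains sl : Bool) with _ | _
      · rw [List.any_eq_false]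
        intro p hp
        simp only [Bool.and_eq_true, not_and]
        intro hpc hpeq
        have := (List.all_eq_true.mp hcompl) p hp
        rw [hpc] at this; simp at this
        rw [beq_iff_eq] at hpeq
        rw [hpeq] at this
        simp [this] at hc
      · rw [List.any_eq_true]
        have hslmem : sl ∈ seasons := by simpa using hc
        have := (List.all_eq_true.mp hsound) sl hslmem
        rw [List.any_eq_true] at this
        obtain ⟨p, hp, hps⟩ := this
        simp only [Bool.and_eq_true, beq_iff_eq] at hps
        exact ⟨p, hp, by simp [hps.1]; simpa using hps.2⟩
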